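-- pv_equiv track=rewrite | github.com/pypi-data/pypi-mirror-401 | packages/gamsapi/gamsapi-52.4.0-cp310-cp310-macosx_13_0_x86_64.whl/gams/connect/agents/concatenate.py | _make_dimensions_unique
-- ===== SOURCE A (Python) =====
-- def _make_dimensions_unique(dim_list: list) -> list:
--     """Makes dimensions unique. Example: ['i', 'j', 'j'] -> ['i', 'j', 'j.1']
--
--     Parameters
--     ----------
--     dim_list : list
--         Dimensions
--
--     Returns
--     -------
--     list
--         Unique dimensions
--     """
--     cp_dim_list = dim_list.copy()
--     counts = {}
--     for i, dim in enumerate(cp_dim_list):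
--         cur_count = counts.get(dim, 0)
--         if cur_count > 0:
--             cp_dim_list[i] = "%s.%d" % (dim, cur_count)
--         counts[dim] = cur_count + 1
--
--     return cp_dim_list
-- ===== SOURCE B (Python) =====
-- def _make_dimensions_unique(dim_list: list) -> list:
--     """Two-phase version: index positions per name, then assign suffixes."""
--     groups = {}
--     for i, name in enumerate(dim_list):
--         groups.setdefault(name, []).append(i)
--     result = list(dim_list)
--     for name, positions in groups.items():
--         for k, pos in enumerate(positions[1:], start=1):
--             result[pos] = "%s.%d" % (name, k)
--     return result
-- ===== Notes on version B (the rewrite author's own statement) =====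
-- stated objective: alternative
-- what changed: A's single scan with a running per-name counter is replaced by a two-phase traversal: first build a dict mapping each name to the ordered list of its positions, then assign 'name.k' at the k-th (k>0) position of each name into a fresh copy of the input.
import Mathlib
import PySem

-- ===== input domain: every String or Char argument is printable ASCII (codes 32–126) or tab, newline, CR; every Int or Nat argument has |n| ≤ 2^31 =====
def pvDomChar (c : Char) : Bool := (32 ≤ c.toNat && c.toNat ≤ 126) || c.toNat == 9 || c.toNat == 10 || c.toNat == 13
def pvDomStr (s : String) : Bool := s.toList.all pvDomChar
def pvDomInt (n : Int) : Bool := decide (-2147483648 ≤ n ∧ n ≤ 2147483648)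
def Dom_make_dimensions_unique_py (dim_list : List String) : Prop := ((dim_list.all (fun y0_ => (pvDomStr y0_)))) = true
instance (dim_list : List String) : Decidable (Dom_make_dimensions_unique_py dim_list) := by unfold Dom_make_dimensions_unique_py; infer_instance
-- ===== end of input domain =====

-- B replaces A's single running-count scan by a two-phase traversal (index the positions of
-- each name in a dict, then assign 'name.k' at each non-first position); objective: alternative
-- (same O(n) cost, different shape). Equivalence of the return values is proved; neither
-- implementation mutates its argument (A copies first, B builds a fresh list).

-- ===== PORT A =====
-- A's loop reads cp_dim_list[i] before (possibly) overwriting it, so the in-place scan is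
-- exactly this element-wise rebuild carrying the counts dict.
def mduLoopA (counts : PySem.Dict String Int) : List String → List String
  | [] => []
  | dim :: rest =>
    let cur := counts.getD dim 0
    (if cur > 0 then dim ++ "." ++ PySem.Int.toStr cur else dim) ::
      mduLoopA (counts.insert dim (cur + 1)) rest

def make_dimensions_unique_py (dim_list : List String) : List String :=
  mduLoopA PySem.Dict.empty dim_list

-- ===== PORT B =====
def make_dimensions_unique_py_alt (dim_list : List String) : List String :=
  let groups : PySem.Dict String (List Int) :=
    (PySem.List.enumerate dim_list 0).foldl
      (fun g p => g.modify p.2 [] (fun l => l ++ [p.1])) PySem.Dict.empty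
  groups.items.foldl
    (fun res q =>
      (PySem.List.enumerate (PySem.List.slice q.2 (some 1) none) 1).foldl
        (fun r kp => PySem.List.pySetD r kp.2 (q.1 ++ "." ++ PySem.Int.toStr kp.1)) res)
    dim_list

-- ===== PRECONDITION & SPEC =====
def Spec_make_dimensions_unique_py (dim_list : List String) (out : List String) : Prop := out = make_dimensions_unique_py_alt dim_list
instance (dim_list : List String) (out : List String) : Decidable (Spec_make_dimensions_unique_py dim_list out) := by unfold Spec_make_dimensions_unique_py; infer_instance

-- ===== CLAIM (what is proved, stated in full; the proofs are below) =====
def Claim_equal_make_dimensions_unique_py : Prop := ∀ (dim_list : List String), Dom_make_dimensions_unique_py dim_list → Spec_make_dimensions_unique_py dim_list (make_dimensions_unique_py dim_list)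

-- ===== LEMMAS AND PROOFS =====

-- The value both programs place at an index whose element has `c` earlier equal elements.
def renderD (nm : String) (c : Nat) : String :=
  if c = 0 then nm else nm ++ "." ++ PySem.Int.toStr (c : Int)

-- The (increasing) list of positions of `nm` in `xs`, as B's first phase collects it.
def posL (xs : List String) (nm : String) : List Int :=
  ((PySem.List.enumerate xs 0).filter (fun p => p.2 == nm)).map (fun p => p.1)

-- One name's assignment list in B's second phase: (position, suffixed name) pairs.
def asgn (q : String × List Int) : List (Int × String) :=
  (PySem.List.enumerate q.2.tail 1).map
    (fun kp => (kp.2, q.1 ++ "." ++ PySem.Int.toStr kp.1))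

-- Applying a list of (index, value) assignments in order.
def applyA (ps : List (Int × String)) (res : List String) : List String :=
  ps.foldl (fun r a => PySem.List.pySetD r a.1 a.2) res

lemma mduLoopA_length (counts : PySem.Dict String Int) (l : List String) :
    (mduLoopA counts l).length = l.length := by
  induction l generalizing counts with
  | nil => rfl
  | cons d rest ih => simp [mduLoopA, ih]

lemma mduLoopA_getElem? (l : List String) : ∀ (counts : PySem.Dict String Int)
    (pre : List String), (∀ d, counts.getD d 0 = (pre.count d : Int)) → ∀ j : Nat,
    (mduLoopA counts l)[j]? =
      l[j]?.map (fun nm => renderD nm ((pre ++ l.take j).count nm)) := by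
  induction l with
  | nil => intro counts pre _ j; simp [mduLoopA]
  | cons d rest ih =>
    intro counts pre h j
    cases j with
    | zero =>
      simp only [mduLoopA, List.getElem?_cons_zero, Option.map_some, List.take_zero,
        List.append_nil]
      rw [h d]
      by_cases h0 : pre.count d = 0
      · simp [renderD, h0]
      · have hpos : (0 : Int) < (pre.count d : Int) := by exact_mod_cast Nat.pos_of_ne_zero h0
        rw [if_pos hpos, renderD, if_neg h0]
    | succ j =>
      simp only [mduLoopA, List.getElem?_cons_succ, List.take_succ_cons]
      rw [ih (counts.insert d (counts.getD d 0 + 1)) (pre ++ [d]) ?_ j]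
      · congr 1
        funext nm
        congr 2
        rw [List.append_assoc]
        simp
      · intro e
        rw [PySem.Dict.getD_insert]
        by_cases he : e = d
        · subst he; rw [if_pos rfl, h e]
          simp [List.count_append]
        · rw [if_neg he, h e, List.count_append]
          have : List.count e [d] = 0 := by
            simp [List.count_singleton']
            exact fun hde => absurd hde.symm he
          rw [this]; simp

lemma groups_getD (xs : List String) (nm : String) :
    ((PySem.List.enumerate xs 0).foldl
      (fun g p => g.modify p.2 [] (fun l => l ++ [p.1])) PySem.Dict.empty).getD nm []
      = posL xs nm := by
  have h := PySem.Dict.getD_foldl_modify_append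
    ((PySem.List.enumerate xs 0).map Prod.swap) (PySem.Dict.empty (κ := String) (ν := List Int)) nm
  rw [List.foldl_map] at h
  simp only [Prod.fst_swap, Prod.snd_swap, PySem.Dict.getD_empty, List.nil_append,
    List.filter_map, List.map_map] at h
  rw [h, posL]
  congr 1

lemma groups_keys (xs : List String) :
    ((PySem.List.enumerate xs 0).foldl
      (fun g p => g.modify p.2 [] (fun l => l ++ [p.1])) PySem.Dict.empty).keys
      = PySem.Set.ofList xs := by
  have h := PySem.Dict.keys_foldl_modify_key (PySem.List.enumerate xs 0)
    (fun p => p.2) [] (fun _ p l => l ++ [p.1]) (PySem.Dict.empty (κ := String) (ν := List Int))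
  rw [h, PySem.Dict.keys_empty, PySem.List.map_snd_enumerate]
  exact PySem.Set.update_nil_left xs

lemma groups_items (xs : List String) :
    ((PySem.List.enumerate xs 0).foldl
      (fun g p => g.modify p.2 [] (fun l => l ++ [p.1])) PySem.Dict.empty).items
      = (PySem.Set.ofList xs).map (fun k => (k, posL xs k)) := by
  rw [PySem.Dict.items_eq_map_keys _ ?_ ([] : List Int), groups_keys]
  · exact List.map_congr_left (fun k _ => by rw [groups_getD])
  · rw [groups_keys]; exact PySem.Set.nodup_ofList xs

lemma posL_append (xs : List String) (y nm : String) :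
    posL (xs ++ [y]) nm = posL xs nm ++ (if y = nm then [(xs.length : Int)] else []) := by
  simp only [posL, PySem.List.enumerate_append, List.filter_append, List.map_append,
    PySem.List.enumerate_cons, PySem.List.enumerate_nil]
  congr 1
  by_cases hy : y = nm <;> simp [hy]

lemma posL_length (xs : List String) (nm : String) :
    (posL xs nm).length = xs.count nm := by
  rw [posL, List.length_map, ← List.countP_eq_length_filter]
  rw [show xs.count nm = ((PySem.List.enumerate xs 0).map (fun p => p.2)).count nm by
    rw [PySem.List.map_snd_enumerate]]
  rw [List.count_eq_countP, List.countP_map]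
  rfl

lemma posL_nonneg (xs : List String) (nm : String) {i : Int} (h : i ∈ posL xs nm) :
    0 ≤ i := by
  simp only [posL, List.mem_map, List.mem_filter] at h
  obtain ⟨p, ⟨hp, _⟩, rfl⟩ := h
  rw [PySem.List.mem_enumerate_iff] at hp
  obtain ⟨k, _, rfl⟩ := hp
  simp

lemma posL_nodup (xs : List String) (nm : String) : (posL xs nm).Nodup := by
  have h := (PySem.List.pairwise_lt_enumerate xs 0).filter (fun p => p.2 == nm)
  have h2 : (posL xs nm).Pairwise (· < ·) := List.Pairwise.map _ (fun a b hab => hab) h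
  exact h2.imp (fun hab => ne_of_lt hab)

lemma count_take_lt (xs : List String) (nm : String) (j : Nat) (hj : j < xs.length)
    (hn : xs[j] = nm) : (xs.take j).count nm < xs.count nm := by
  conv_rhs => rw [← List.take_append_drop j xs]
  rw [← List.getElem_cons_drop hj, hn, List.count_append, List.count_cons_self]
  omega

lemma posL_getElem? (xs : List String) (nm : String) (c : Nat) (i : Int) :
    (posL xs nm)[c]? = some i ↔
      ∃ j : Nat, i = (j : Int) ∧ ∃ h : j < xs.length,
        xs[j] = nm ∧ (xs.take j).count nm = c := by
  induction xs using List.reverseRecOn generalizing c i with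
  | nil => simp [posL, PySem.List.enumerate_nil]
  | append_singleton xs y ih =>
    rw [posL_append, List.getElem?_append]
    by_cases hc : c < (posL xs nm).length
    · rw [if_pos hc, ih]
      constructor
      · rintro ⟨j, rfl, hj, hn, hcnt⟩
        refine ⟨j, rfl, by simp; omega, ?_, ?_⟩
        · rw [List.getElem_append_left hj]; exact hn
        · rw [List.take_append_of_le_length (by omega)]; exact hcnt
      · rintro ⟨j, rfl, hj, hn, hcnt⟩
        simp only [List.length_append, List.length_singleton] at hj
        have hj' : j < xs.length := by
          by_contra hge
          have hjn : j = xs.length := by omega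
          subst hjn
          rw [List.take_append_of_le_length (le_refl _), List.take_length] at hcnt
          rw [posL_length] at hc
          omega
        refine ⟨j, rfl, hj', ?_, ?_⟩
        · rw [List.getElem_append_left hj'] at hn; exact hn
        · rw [List.take_append_of_le_length (by omega)] at hcnt; exact hcnt
    · rw [if_neg hc]
      rw [posL_length] at hc
      by_cases hy : y = nm
      · rw [if_pos hy]
        constructor
        · intro hsome
          have hc0 : c - (posL xs nm).length = 0 := by
            by_contra h0
            rw [List.getElem?_eq_none (by simp only [List.length_singleton]; omega)] at hsome
            simp at hsome
          have hceq : c = xs.count nm := by rw [posL_length] at hc0; omega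
          simp only [hc0, List.getElem?_cons_zero, Option.some.injEq] at hsome
          refine ⟨xs.length, hsome.symm, by simp, ?_, ?_⟩
          · rw [List.getElem_append_right (le_refl _)]; simp [hy]
          · rw [List.take_append_of_le_length (le_refl _), List.take_length, hceq]
        · rintro ⟨j, rfl, hj, hn, hcnt⟩
          simp only [List.length_append, List.length_singleton] at hj
          have hj' : j = xs.length := by
            by_contra hne
            have hjlt : j < xs.length := by omega
            rw [List.getElem_append_left hjlt] at hn
            rw [List.take_append_of_le_length (by omega)] at hcnt
            have := count_take_lt xs nm j hjlt hn
            omega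
          subst hj'
          rw [List.take_append_of_le_length (le_refl _), List.take_length] at hcnt
          have : c - (posL xs nm).length = 0 := by rw [posL_length]; omega
          simp [this]
      · rw [if_neg hy]
        simp only [List.getElem?_nil]
        constructor
        · intro hsome; simp at hsome
        · rintro ⟨j, rfl, hj, hn, hcnt⟩
          simp only [List.length_append, List.length_singleton] at hj
          by_cases hj' : j < xs.length
          · rw [List.getElem_append_left hj'] at hn
            rw [List.take_append_of_le_length (by omega)] at hcnt
            have := count_take_lt xs nm j hj' hn
            omega
          · have : j = xs.length := by omega
            subst this
            rw [List.getElem_append_right (le_refl _)] at hn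
            simp at hn
            exact absurd hn hy

lemma applyA_length (ps : List (Int × String)) (res : List String) :
    (applyA ps res).length = res.length := by
  induction ps generalizing res with
  | nil => rfl
  | cons a ps ih => simp [applyA] at ih ⊢; rw [ih, PySem.List.length_pySetD]

lemma applyA_miss (ps : List (Int × String)) (res : List String) (j : Nat)
    (h : ∀ a ∈ ps, 0 ≤ a.1 ∧ a.1 ≠ (j : Int)) :
    (applyA ps res)[j]? = res[j]? := by
  induction ps generalizing res with
  | nil => rfl
  | cons a ps ih =>
    have ha := h a (by simp)
    have : PySem.List.pySetD res a.1 a.2 = res.set a.1.toNat a.2 :=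
      PySem.List.pySetD_of_nonneg res a.2 ha.1
    simp only [applyA, List.foldl_cons] at ih ⊢
    rw [ih _ (fun b hb => h b (by simp [hb])), this, List.getElem?_set_ne]
    omega

lemma applyA_append (ps₁ ps₂ : List (Int × String)) (res : List String) :
    applyA (ps₁ ++ ps₂) res = applyA ps₂ (applyA ps₁ res) := by
  simp [applyA, List.foldl_append]

lemma applyA_hit (ps₂ : List (Int × String)) (res : List String) (v : String) (j : Nat)
    (hj : j < res.length) (h : ∀ a ∈ ps₂, 0 ≤ a.1 ∧ a.1 ≠ (j : Int)) :
    (applyA (((j : Int), v) :: ps₂) res)[j]? = some v := by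
  show (applyA ps₂ (PySem.List.pySetD res (j : Int) v))[j]? = some v
  rw [applyA_miss _ _ _ h, PySem.List.pySetD_natCast, List.getElem?_set_self hj]

lemma mem_asgn {a : Int × String} {nm : String} {poss : List Int}
    (h : a ∈ asgn (nm, poss)) :
    ∃ k : Nat, ∃ hk : k < poss.tail.length,
      a = (poss.tail[k], nm ++ "." ++ PySem.Int.toStr ((1 : Int) + (k : Int))) := by
  simp only [asgn, List.mem_map] at h
  obtain ⟨kp, hkp, rfl⟩ := h
  rw [PySem.List.mem_enumerate_iff] at hkp
  obtain ⟨k, hk, rfl⟩ := hkp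
  exact ⟨k, hk, rfl⟩

lemma alt_eq_applyA (xs : List String) :
    make_dimensions_unique_py_alt xs =
      applyA ((PySem.Set.ofList xs).flatMap (fun nm => asgn (nm, posL xs nm))) xs := by
  simp only [make_dimensions_unique_py_alt]
  rw [groups_items, List.foldl_map, applyA, List.foldl_flatMap]
  congr 1
  funext res nm
  rw [asgn, List.foldl_map]
  simp only [PySem.List.slice_from_one]

-- tail elements seen as positions: a.1 ∈ posL and, at tail index k, equals posL[k+1]

lemma asgn_pos_spec (xs : List String) (nm : String) {a : Int × String}
    (h : a ∈ asgn (nm, posL xs nm)) (j : Nat) (hj : j < xs.length) (ha1 : a.1 = (j : Int)) :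
    xs[j] = nm ∧ (xs.take j).count nm ≠ 0 := by
  obtain ⟨k, hk, rfl⟩ := mem_asgn h
  simp only at ha1
  have hlen : k + 1 < (posL xs nm).length := by
    have := hk; simp only [List.length_tail] at this; omega
  have hget : (posL xs nm)[k + 1]? = some ((j : Int)) := by
    rw [List.getElem?_eq_some_iff]
    refine ⟨hlen, ?_⟩
    rw [← ha1, List.getElem_tail]
  rw [posL_getElem?] at hget
  obtain ⟨j', hjj, hj', hnm, hcnt⟩ := hget
  have : j' = j := by exact_mod_cast hjj.symm
  subst this
  exact ⟨hnm, by omega⟩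

lemma alt_getElem? (xs : List String) (j : Nat) (hj : j < xs.length) :
    (make_dimensions_unique_py_alt xs)[j]? =
      some (renderD xs[j] ((xs.take j).count xs[j])) := by
  rw [alt_eq_applyA]
  by_cases hc : (xs.take j).count xs[j] = 0
  · rw [applyA_miss]
    · rw [List.getElem?_eq_getElem hj, renderD, if_pos hc]
    · intro a ha
      rw [List.mem_flatMap] at ha
      obtain ⟨nm', _, ha⟩ := ha
      refine ⟨?_, ?_⟩
      · obtain ⟨k, hk, rfl⟩ := mem_asgn ha
        exact posL_nonneg xs nm' (List.mem_of_mem_tail (List.getElem_mem hk))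
      · intro haj
        obtain ⟨hnm, hcnt⟩ := asgn_pos_spec xs nm' ha j hj haj
        rw [hnm] at hc
        exact hcnt hc
  · -- the hit case
    set nm := xs[j] with hnm
    set c := (xs.take j).count nm with hcdef
    have hmem : nm ∈ PySem.Set.ofList xs := by
      rw [PySem.Set.mem_ofList]; exact List.getElem_mem hj
    obtain ⟨s₁, s₂, hS⟩ := List.append_of_mem hmem
    have hnd := PySem.Set.nodup_ofList xs
    rw [hS] at hnd
    have hnm₂ : nm ∉ s₂ := by simp [List.nodup_append] at hnd; tauto
    have hposs : (posL xs nm)[c]? = some ((j : Int)) :=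
      (posL_getElem? xs nm c (j : Int)).mpr ⟨j, rfl, hj, rfl, rfl⟩
    have hc1 : 1 ≤ c := Nat.one_le_iff_ne_zero.mpr hc
    rcases hP : posL xs nm with _ | ⟨p0, t⟩
    · rw [hP] at hposs; simp at hposs
    have hnodup := posL_nodup xs nm
    rw [hP] at hnodup
    have hposs' : t[c-1]? = some ((j : Int)) := by
      rw [hP, show c = (c-1)+1 by omega, List.getElem?_cons_succ] at hposs
      exact hposs
    obtain ⟨htlt, htj⟩ := List.getElem?_eq_some_iff.mp hposs'
    have hsplit : t = t.take (c-1) ++ (j : Int) :: t.drop c := by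
      conv_lhs => rw [← List.take_append_drop (c-1) t]
      congr 1
      rw [← htj, ← List.getElem_cons_drop htlt, show c - 1 + 1 = c from by omega]
    -- unique position inside nm's tail
    have hjnotdrop : (j : Int) ∉ t.drop c := by
      have hta := hnodup.of_cons
      rw [hsplit] at hta
      exact (List.nodup_cons.mp hta.of_append_right).1
    -- decompose asgn (nm, posL xs nm)
    have hasgn : asgn (nm, posL xs nm) =
        (PySem.List.enumerate (t.take (c-1)) 1).map
            (fun kp => (kp.2, nm ++ "." ++ PySem.Int.toStr kp.1))
          ++ ((j : Int), nm ++ "." ++ PySem.Int.toStr ((c : Nat) : Int))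
          :: (PySem.List.enumerate (t.drop c) ((c : Int) + 1)).map
            (fun kp => (kp.2, nm ++ "." ++ PySem.Int.toStr kp.1)) := by
      rw [asgn, hP]
      simp only [List.tail_cons]
      conv_lhs => rw [hsplit]
      rw [PySem.List.enumerate_append, PySem.List.enumerate_cons, List.map_append]
      have hlen : (t.take (c-1)).length = c - 1 := by simp; omega
      have h1 : (1 : Int) + ((t.take (c-1)).length : Int) = (c : Int) := by
        rw [hlen]; push_cast [hc1]; omega
      rw [hlen] at h1 ⊢
      rw [h1]
      rfl
    rw [hS, List.flatMap_append, List.flatMap_cons, hasgn]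
    simp only [List.append_assoc, List.cons_append]
    rw [applyA_append, applyA_append]
    rw [applyA_hit _ _ _ j (by rw [applyA_length, applyA_length]; exact hj) ?_]
    · rw [renderD, if_neg hc]
    · intro a ha
      rw [List.mem_append] at ha
      rcases ha with ha | ha
      · -- from nm's own later positions
        rw [List.mem_map] at ha
        obtain ⟨kp, hkp, rfl⟩ := ha
        rw [PySem.List.mem_enumerate_iff] at hkp
        obtain ⟨k, hk, rfl⟩ := hkp
        have hmem' : (t.drop c)[k] ∈ t.drop c := List.getElem_mem hk
        refine ⟨?_, ?_⟩
        · apply posL_nonneg xs nm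
          rw [hP]
          exact List.mem_cons_of_mem _ (List.mem_of_mem_drop hmem')
        · intro heq
          simp only at heq
          rw [heq] at hmem'
          exact hjnotdrop hmem'
      · -- from other names
        rw [List.mem_flatMap] at ha
        obtain ⟨nm', hnm', ha⟩ := ha
        refine ⟨?_, ?_⟩
        · obtain ⟨k, hk, rfl⟩ := mem_asgn ha
          exact posL_nonneg xs nm' (List.mem_of_mem_tail (List.getElem_mem hk))
        · intro haj
          obtain ⟨hxs, _⟩ := asgn_pos_spec xs nm' ha j hj haj
          rw [← hnm] at hxs
          exact hnm₂ (hxs ▸ hnm')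

lemma alt_length (xs : List String) :
    (make_dimensions_unique_py_alt xs).length = xs.length := by
  rw [alt_eq_applyA, applyA_length]

-- ===== VERDICT (by name: the statement is the Claim_ definition above) =====
theorem make_dimensions_unique_py_spec : Claim_equal_make_dimensions_unique_py := by
  intro dim_list _
  unfold Spec_make_dimensions_unique_py
  apply List.ext_getElem?
  intro j
  by_cases hj : j < dim_list.length
  · have hA := mduLoopA_getElem? dim_list PySem.Dict.empty []
      (by intro d; simp [PySem.Dict.getD_empty]) j
    rw [make_dimensions_unique_py, hA, alt_getElem? dim_list j hj]
    simp [List.getElem?_eq_getElem hj]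
  · rw [List.getElem?_eq_none, List.getElem?_eq_none]
    · rw [alt_length]; omega
    · rw [make_dimensions_unique_py, mduLoopA_length]; omega
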